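-- pv_equiv track=rewrite | github.com/wxdangel-ship-it/RCSD_Topo_Poc | src/rcsd_topo_poc/modules/t02_junction_anchor/stage3_step6_geometry_solve.py | _sorted_unique
-- ===== SOURCE A (Python) =====
-- from typing import Any, Iterable
--
-- def _sorted_unique(values: Iterable[str]) -> tuple[str, ...]:
--     return tuple(
--         sorted(
--             {
--                 str(value)
--                 for value in values
--                 if value is not None and str(value).strip()
--             }
--         )
--     )
-- ===== SOURCE B (Python) =====
-- def _sorted_unique(values):
--     kept = sorted(str(v) for v in values if v is not None and str(v).strip())
--     out = []
--     prev = None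
--     for s in kept:
--         if s != prev:
--             out.append(s)
--             prev = s
--     return tuple(out)
-- ===== Notes on version B (the rewrite author's own statement) =====
-- stated objective: alternative
-- what changed: Replaces the hash-set dedup (set comprehension then sort) with sort-first followed by a single adjacent-deduplication scan that maintains only the previously kept string.
import Mathlib
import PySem

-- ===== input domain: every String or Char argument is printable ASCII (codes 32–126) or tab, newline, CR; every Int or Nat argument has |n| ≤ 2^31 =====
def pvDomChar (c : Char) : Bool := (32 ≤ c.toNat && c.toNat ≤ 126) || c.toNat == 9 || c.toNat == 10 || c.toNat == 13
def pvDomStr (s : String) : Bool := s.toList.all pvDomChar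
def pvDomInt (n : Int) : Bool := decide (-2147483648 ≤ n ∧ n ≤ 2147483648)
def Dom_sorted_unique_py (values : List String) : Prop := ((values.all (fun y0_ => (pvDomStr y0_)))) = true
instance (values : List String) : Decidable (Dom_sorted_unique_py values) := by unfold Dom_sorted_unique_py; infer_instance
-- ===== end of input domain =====

-- B replaces A's hash-set dedup + sort by sort-first then one adjacent-dedup scan (objective: alternative).

-- ===== PORT A =====
-- {str(value) for value in values if value is not None and str(value).strip()} then sorted, as tuple.
-- values : List String, so 'value is not None' is always true and str(value) = value;
-- truthiness of str(value).strip() = stripped string nonempty.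
def sorted_unique_py (values : List String) : List String :=
  PySem.List.sorted
    (PySem.Set.ofList (values.filter (fun v => !(PySem.Str.strip v == ""))))
    (fun x => x) false

-- ===== PORT B =====
-- the for-loop over kept, state (out, prev)
def sortedUniqueLoop (kept : List String) : List String × Option String :=
  kept.foldl
    (fun st s => if (some s == st.2) then st else (st.1 ++ [s], some s))
    ([], none)

def sorted_unique_py_alt (values : List String) : List String :=
  let kept := PySem.List.sorted
    (values.filter (fun v => !(PySem.Str.strip v == ""))) (fun x => x) false
  (sortedUniqueLoop kept).1

-- ===== PRECONDITION & SPEC =====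
def Spec_sorted_unique_py (values : List String) (out : List String) : Prop := out = sorted_unique_py_alt values
instance (values : List String) (out : List String) : Decidable (Spec_sorted_unique_py values out) := by unfold Spec_sorted_unique_py; infer_instance

-- ===== CLAIM (what is proved, stated in full; the proofs are below) =====
def Claim_equal_sorted_unique_py : Prop := ∀ (values : List String), Dom_sorted_unique_py values → Spec_sorted_unique_py values (sorted_unique_py values)

-- ===== LEMMAS AND PROOFS =====

-- recursive characterisation of the loop
def dedupAdj : Option String → List String → List String
  | _, [] => []
  | prev, h :: t => if some h = prev then dedupAdj prev t else h :: dedupAdj (some h) t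

theorem sortedUniqueLoop_eq_aux (l : List String) :
    ∀ (out : List String) (prev : Option String),
      (l.foldl (fun st s => if (some s == st.2) then st else (st.1 ++ [s], some s))
        (out, prev)).1 = out ++ dedupAdj prev l := by
  induction l with
  | nil => intro out prev; simp [dedupAdj]
  | cons h t ih =>
    intro out prev
    by_cases hp : some h = prev
    · rw [List.foldl_cons, if_pos (by simp [hp]), dedupAdj, if_pos hp, ih]
    · rw [List.foldl_cons, if_neg (by simp [hp]), dedupAdj, if_neg hp, ih,
        List.append_assoc, List.singleton_append]

theorem sortedUniqueLoop_eq (l : List String) :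
    (sortedUniqueLoop l).1 = dedupAdj none l := by
  unfold sortedUniqueLoop
  simpa using sortedUniqueLoop_eq_aux l [] none

-- membership and strict sortedness of dedupAdj on a ≤-sorted list, jointly by induction
theorem dedupAdj_some_spec (l : List String) :
    l.Pairwise (· ≤ ·) →
    ∀ p : String, (∀ x ∈ l, p ≤ x) →
      ((∀ x, x ∈ dedupAdj (some p) l ↔ (x ∈ l ∧ x ≠ p)) ∧
        (dedupAdj (some p) l).Pairwise (· < ·)) := by
  induction l with
  | nil => intro _ p _; simp [dedupAdj]
  | cons h t ih =>
    intro hpw p hp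
    have hpw' : t.Pairwise (· ≤ ·) := hpw.of_cons
    have hht : ∀ x ∈ t, h ≤ x := fun x hx => (List.pairwise_cons.mp hpw).1 x hx
    have hph : p ≤ h := hp h (by simp)
    by_cases he : some h = some p
    · have heq : h = p := by injection he
      have := ih hpw' p (by intro x hx; exact hp x (by simp [hx]))
      refine ⟨fun x => ?_, ?_⟩
      · rw [dedupAdj, if_pos he]
        rw [this.1 x]
        constructor
        · rintro ⟨hx, hne⟩; exact ⟨by simp [hx], hne⟩
        · rintro ⟨hx, hne⟩
          rcases List.mem_cons.mp hx with rfl | hx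
          · exact absurd heq hne
          · exact ⟨hx, hne⟩
      · rw [dedupAdj, if_pos he]; exact this.2
    · have hne : h ≠ p := fun e => he (by rw [e])
      have hlt : p < h := lt_of_le_of_ne hph (Ne.symm hne)
      have ihh := ih hpw' h hht
      refine ⟨fun x => ?_, ?_⟩
      · rw [dedupAdj, if_neg he]
        simp only [List.mem_cons, ihh.1 x]
        constructor
        · rintro (rfl | ⟨hx, _⟩)
          · exact ⟨by simp, hne⟩
          · refine ⟨by simp [hx], ?_⟩
            have : h ≤ x := hht x hx
            exact fun e => absurd (e ▸ this) (not_le.mpr hlt)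
        · rintro ⟨hx, hxp⟩
          rcases hx with rfl | hx
          · exact Or.inl rfl
          · by_cases hxh : x = h
            · exact Or.inl hxh
            · exact Or.inr ⟨hx, hxh⟩
      · rw [dedupAdj, if_neg he]
        refine List.pairwise_cons.mpr ⟨?_, ihh.2⟩
        intro x hx
        have hxm := (ihh.1 x).mp hx
        exact lt_of_le_of_ne (hht x hxm.1) (Ne.symm hxm.2)

theorem dedupAdj_none_spec (l : List String) (hpw : l.Pairwise (· ≤ ·)) :
    (∀ x, x ∈ dedupAdj none l ↔ x ∈ l) ∧ (dedupAdj none l).Pairwise (· < ·) := by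
  cases l with
  | nil => simp [dedupAdj]
  | cons h t =>
    have hht : ∀ x ∈ t, h ≤ x := fun x hx => (List.pairwise_cons.mp hpw).1 x hx
    have := dedupAdj_some_spec t hpw.of_cons h hht
    refine ⟨fun x => ?_, ?_⟩
    · rw [dedupAdj, if_neg (by simp)]
      simp only [List.mem_cons, this.1 x]
      constructor
      · rintro (rfl | ⟨hx, _⟩)
        · exact Or.inl rfl
        · exact Or.inr hx
      · rintro (rfl | hx)
        · exact Or.inl rfl
        · by_cases hxh : x = h
          · exact Or.inl hxh
          · exact Or.inr ⟨hx, hxh⟩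
    · rw [dedupAdj, if_neg (by simp)]
      refine List.pairwise_cons.mpr ⟨?_, this.2⟩
      intro x hx
      have hxm := (this.1 x).mp hx
      exact lt_of_le_of_ne (hht x hxm.1) (Ne.symm hxm.2)

theorem sorted_unique_main (fs : List String) :
    PySem.List.sorted (PySem.Set.ofList fs) (fun x => x) false
      = dedupAdj none (PySem.List.sorted fs (fun x => x) false) := by
  set srt := PySem.List.sorted fs (fun x => x) false with hsrt
  have hpw : srt.Pairwise (· ≤ ·) := by
    simpa using PySem.List.sorted_pairwise fs (fun x => x)
  obtain ⟨hmem, hlt⟩ := dedupAdj_none_spec srt hpw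
  have hnd : (dedupAdj none srt).Nodup :=
    hlt.imp (fun h => ne_of_lt h)
  have hperm : (dedupAdj none srt).Perm (PySem.Set.ofList fs) := by
    rw [List.perm_ext_iff_of_nodup hnd (PySem.Set.nodup_ofList fs)]
    intro a
    rw [hmem a, PySem.Set.mem_ofList]
    rw [hsrt, PySem.List.mem_sorted]
  exact PySem.List.sorted_eq_of_perm_of_pairwise_lt _ _ _ hperm hlt

-- ===== VERDICT (by name: the statement is the Claim_ definition above) =====
theorem sorted_unique_py_spec : Claim_equal_sorted_unique_py := by
  intro values _
  unfold Spec_sorted_unique_py sorted_unique_py sorted_unique_py_alt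
  rw [sortedUniqueLoop_eq]
  exact sorted_unique_main _
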